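-- pv_equiv track=rewrite | github.com/fkie-cad/FACT_firmadyne_analysis_plugin | internal/firmadyne_execution.py | derive_jstree_tree_structure_from_path
-- ===== SOURCE A (Python) =====
-- def derive_jstree_tree_structure_from_path(list_element, list_of_jstree_dict, parent):
--     jstree_tree_list = []
--     line_list = list_element.split("/")
--     parent_counter = 1
--     for list_element in line_list:
--         jstree_dict = {"id": list_element, "parent": parent, "text": list_element}
--         if parent_counter < len(line_list):
--             jstree_dict.update({"icon": "/static/file_icons/folder.png"})
--             parent_counter += 1
--         else:
--             jstree_dict.update({"icon": "/static/file_icons/text.png"})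
--         parent = list_element
--         if jstree_dict in list_of_jstree_dict:
--             continue
--         jstree_tree_list.append(jstree_dict)
--     return jstree_tree_list
-- ===== SOURCE B (Python) =====
-- FOLDER_ICON = "/static/file_icons/folder.png"
-- TEXT_ICON = "/static/file_icons/text.png"
--
--
-- def derive_jstree_tree_structure_from_path(list_element, list_of_jstree_dict, parent):
--     # Index the known dicts once as a hash set of (id, parent, text, icon) tuples;
--     # only dicts with exactly those four keys can ever equal a built dict.
--     seen = {(d["id"], d["parent"], d["text"], d["icon"])
--             for d in list_of_jstree_dict
--             if d.keys() == {"id", "parent", "text", "icon"}}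
--
--     def build(prev, comps):
--         if not comps:
--             return []
--         head, rest = comps[0], comps[1:]
--         icon = FOLDER_ICON if rest else TEXT_ICON
--         tail = build(head, rest)
--         if (head, prev, head, icon) in seen:
--             return tail
--         return [{"id": head, "parent": prev, "text": head, "icon": icon}] + tail
--
--     return build(parent, list_element.split("/"))
-- ===== Notes on version B (the rewrite author's own statement) =====
-- stated objective: alternative
-- what changed: Replaces A's per-component linear scan of list_of_jstree_dict (dict equality against every element) by a (id, parent, text, icon) tuple hash-set index built once from the well-keyed dicts, and builds the result by recursion on the path components instead of A's accumulator loop with a parent counter.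
import Mathlib
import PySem

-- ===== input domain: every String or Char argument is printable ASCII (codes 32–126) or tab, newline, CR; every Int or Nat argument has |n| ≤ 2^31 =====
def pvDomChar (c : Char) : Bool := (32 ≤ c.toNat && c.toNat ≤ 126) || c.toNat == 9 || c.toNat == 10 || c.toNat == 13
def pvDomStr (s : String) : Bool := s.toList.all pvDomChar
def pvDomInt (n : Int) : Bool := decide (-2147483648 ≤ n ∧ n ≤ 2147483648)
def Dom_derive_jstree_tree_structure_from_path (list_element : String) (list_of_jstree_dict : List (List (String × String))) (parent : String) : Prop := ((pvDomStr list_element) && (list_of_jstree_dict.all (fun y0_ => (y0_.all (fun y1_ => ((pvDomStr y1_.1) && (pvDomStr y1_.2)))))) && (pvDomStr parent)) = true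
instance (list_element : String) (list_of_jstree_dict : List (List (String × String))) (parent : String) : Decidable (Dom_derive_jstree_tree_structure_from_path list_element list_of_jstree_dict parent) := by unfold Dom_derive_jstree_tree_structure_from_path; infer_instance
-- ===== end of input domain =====

-- B indexes the given dicts ONCE as a hash set of (id, parent, text, icon) tuples (only dicts with
-- exactly those four keys can equal a built dict), then builds the result by recursion on the path
-- components, so A's inner list scan per component disappears; objective: alternative.

-- Python dict equality (`jstree_dict in list_of_jstree_dict` compares dicts ignoring key order;
-- duplicate keys in an input association list collapse with later-value-wins, as in Python):
def pyDictBeq (a b : List (String × String)) : Bool :=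
  let da := PySem.Dict.ofList a
  let db := PySem.Dict.ofList b
  da.keys.all (fun k => db.get? k == da.get? k) && db.keys.all (fun k => da.contains k)

-- ===== PORT A =====
def loopA (lod : List (List (String × String))) (n : Int) :
    List String → String → Int → List (List (String × String)) → List (List (String × String))
  | [], _, _, acc => acc
  | x :: rest, par, pc, acc =>
    let base := [("id", x), ("parent", par), ("text", x)]
    let d := if pc < n then base ++ [("icon", "/static/file_icons/folder.png")]
             else base ++ [("icon", "/static/file_icons/text.png")]
    let pc' := if pc < n then pc + 1 else pc
    let acc' := if lod.any (fun e => pyDictBeq e d) then acc else acc ++ [d]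
    loopA lod n rest x pc' acc'

def derive_jstree_tree_structure_from_path (list_element : String) (list_of_jstree_dict : List (List (String × String))) (parent : String) : List (List (String × String)) :=
  let line_list := (PySem.Str.split? list_element "/").getD []
  loopA list_of_jstree_dict (line_list.length : Int) line_list parent 1 []

-- ===== PORT B =====
-- d.keys() == {"id", "parent", "text", "icon"}  (Python compares dict_keys with a set as sets)
def keysOKB (e : List (String × String)) : Bool :=
  PySem.Set.equal (PySem.Dict.ofList e).keys (PySem.Set.ofList ["id", "parent", "text", "icon"])

-- (d["id"], d["parent"], d["text"], d["icon"]) — the keys are present when keysOKB holds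
def tupOf (e : List (String × String)) : String × String × String × String :=
  let de := PySem.Dict.ofList e
  (de.getD "id" "", de.getD "parent" "", de.getD "text" "", de.getD "icon" "")

-- the set comprehension: iterate lod in order, keep the canonical tuples of the well-keyed dicts
def seenOf (lod : List (List (String × String))) : PySem.Set (String × String × String × String) :=
  PySem.Set.ofList (lod.filterMap (fun e => if keysOKB e then some (tupOf e) else none))

def buildB (seen : PySem.Set (String × String × String × String)) :
    String → List String → List (List (String × String))
  | _, [] => []
  | prev, head :: rest =>
    let icon := if rest.isEmpty then "/static/file_icons/text.png" else "/static/file_icons/folder.png"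
    let tail := buildB seen head rest
    if seen.contains (head, prev, head, icon) then tail
    else [("id", head), ("parent", prev), ("text", head), ("icon", icon)] :: tail

def derive_jstree_tree_structure_from_path_alt (list_element : String) (list_of_jstree_dict : List (List (String × String))) (parent : String) : List (List (String × String)) :=
  buildB (seenOf list_of_jstree_dict) parent ((PySem.Str.split? list_element "/").getD [])

-- ===== PRECONDITION & SPEC =====
def Spec_derive_jstree_tree_structure_from_path (list_element : String) (list_of_jstree_dict : List (List (String × String))) (parent : String) (out : List (List (String × String))) : Prop := out = derive_jstree_tree_structure_from_path_alt list_element list_of_jstree_dict parent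
instance (list_element : String) (list_of_jstree_dict : List (List (String × String))) (parent : String) (out : List (List (String × String))) : Decidable (Spec_derive_jstree_tree_structure_from_path list_element list_of_jstree_dict parent out) := by unfold Spec_derive_jstree_tree_structure_from_path; infer_instance

-- ===== CLAIM (what is proved, stated in full; the proofs are below) =====
def Claim_equal_derive_jstree_tree_structure_from_path : Prop := ∀ (list_element : String) (list_of_jstree_dict : List (List (String × String))) (parent : String), Dom_derive_jstree_tree_structure_from_path list_element list_of_jstree_dict parent → Spec_derive_jstree_tree_structure_from_path list_element list_of_jstree_dict parent (derive_jstree_tree_structure_from_path list_element list_of_jstree_dict parent)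

-- ===== LEMMAS AND PROOFS =====

-- common normal form: one dict per component, parent threaded, last element gets text.png
def mapLast : List String → String → List (List (String × String))
  | [], _ => []
  | x :: rest, par =>
    (if rest.isEmpty then [("id", x), ("parent", par), ("text", x), ("icon", "/static/file_icons/text.png")]
     else [("id", x), ("parent", par), ("text", x), ("icon", "/static/file_icons/folder.png")]) :: mapLast rest x

theorem loopA_eq (lod : List (List (String × String))) (n : Int) :
    ∀ (rest : List String) (par : String) (pc : Int) (acc : List (List (String × String))),
      pc + rest.length = n + 1 →
      loopA lod n rest par pc acc
        = acc ++ (mapLast rest par).filter (fun d => ! (lod.any (fun e => pyDictBeq e d))) := by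
  intro rest
  induction rest with
  | nil => intro par pc acc h; simp [loopA, mapLast]
  | cons x rest ih =>
    intro par pc acc h
    simp only [List.length_cons] at h
    push_cast at h
    cases rest with
    | nil =>
      have hpc : ¬ pc < n := by simp at h; omega
      conv_lhs => rw [loopA]
      simp only [if_neg hpc, loopA, List.cons_append, List.nil_append]
      rw [show mapLast [x] par = [[("id", x), ("parent", par), ("text", x), ("icon", "/static/file_icons/text.png")]] from by simp [mapLast]]
      rw [List.filter_cons]
      cases hm : lod.any (fun e => pyDictBeq e [("id", x), ("parent", par), ("text", x), ("icon", "/static/file_icons/text.png")]) <;> simp_all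
    | cons y rs =>
      simp only [List.length_cons] at h
      push_cast at h
      have hpc : pc < n := by omega
      have h' : (pc + 1) + ((y :: rs).length : Int) = n + 1 := by
        simp only [List.length_cons]; push_cast; omega
      conv_lhs => rw [loopA]
      simp only [if_pos hpc, List.cons_append, List.nil_append]
      rw [ih x (pc + 1) _ h']
      rw [show mapLast (x :: y :: rs) par = [("id", x), ("parent", par), ("text", x), ("icon", "/static/file_icons/folder.png")] :: mapLast (y :: rs) x from by
        simp [mapLast]]
      rw [List.filter_cons]
      cases hm : lod.any (fun e => pyDictBeq e [("id", x), ("parent", par), ("text", x), ("icon", "/static/file_icons/folder.png")]) <;>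
        simp [List.append_assoc]

-- a dict e equals a built dict iff it has exactly the four keys and the matching canonical tuple
theorem pyDictBeq_built (e : List (String × String)) (x p ic : String) :
    pyDictBeq e [("id", x), ("parent", p), ("text", x), ("icon", ic)]
      = (keysOKB e && (tupOf e == (x, p, x, ic))) := by
  have hdb : PySem.Dict.ofList [("id", x), ("parent", p), ("text", x), ("icon", ic)]
      = PySem.Dict.mk [("id", x), ("parent", p), ("text", x), ("icon", ic)] := by
    simp [PySem.Dict.ofList, PySem.Dict.update, PySem.Dict.insert, PySem.Dict.empty, PySem.Dict.contains]
  have hget : ∀ k, (PySem.Dict.mk [("id", x), ("parent", p), ("text", x), ("icon", ic)]).get? k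
      = if "id" == k then some x else if "parent" == k then some p else if "text" == k then some x
        else if "icon" == k then some ic else none := by
    intro k; simp [PySem.Dict.get?_mk_cons]; rfl
  rw [Bool.eq_iff_iff]
  unfold pyDictBeq keysOKB tupOf
  rw [hdb]
  simp only [PySem.Dict.keys_mk, Bool.and_eq_true, List.all_eq_true, PySem.Set.equal_iff,
    PySem.Set.mem_ofList, beq_iff_eq, Prod.mk.injEq, hget]
  constructor
  · rintro ⟨H1, H2⟩
    have hcm : ∀ k, k ∈ ["id", "parent", "text", "icon"] → k ∈ (PySem.Dict.ofList e).keys := by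
      intro k hk
      exact (PySem.Dict.contains_iff_mem_keys _ _).mp (H2 k hk)
    have hval : ∀ k v, (PySem.Dict.ofList e).get? k = some v → (PySem.Dict.ofList e).getD k "" = v := by
      intro k v hv; rw [PySem.Dict.getD_eq_get?_getD, hv]; rfl
    refine ⟨fun k => ⟨fun hk => ?_, fun hk => hcm k hk⟩, ?_, ?_, ?_, ?_⟩
    · have h := H1 k hk
      by_contra hnk
      simp only [List.mem_cons, List.not_mem_nil, or_false, not_or] at hnk
      obtain ⟨n1, n2, n3, n4⟩ := hnk
      rw [if_neg (by simp [Ne.symm n1]), if_neg (by simp [Ne.symm n2]),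
        if_neg (by simp [Ne.symm n3]), if_neg (by simp [Ne.symm n4])] at h
      exact ((PySem.Dict.get?_eq_none_iff_not_mem_keys _ _).mp h.symm) hk
    · have h := H1 "id" (hcm _ (by simp))
      simp at h
      exact hval _ _ h.symm
    · have h := H1 "parent" (hcm _ (by simp))
      simp at h
      exact hval _ _ h.symm
    · have h := H1 "text" (hcm _ (by simp))
      simp at h
      exact hval _ _ h.symm
    · have h := H1 "icon" (hcm _ (by simp))
      simp at h
      exact hval _ _ h.symm
  · rintro ⟨Hk, h1, h2, h3, h4⟩
    have hmem : ∀ k, k ∈ ["id", "parent", "text", "icon"] → k ∈ (PySem.Dict.ofList e).keys :=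
      fun k hk => (Hk k).mpr hk
    have hsome : ∀ k, k ∈ (PySem.Dict.ofList e).keys →
        (PySem.Dict.ofList e).get? k = some ((PySem.Dict.ofList e).getD k "") := by
      intro k hk
      cases hv : (PySem.Dict.ofList e).get? k with
      | none => exact absurd hk ((PySem.Dict.get?_eq_none_iff_not_mem_keys _ _).mp hv)
      | some v => rw [PySem.Dict.getD_eq_get?_getD, hv]; rfl
    refine ⟨fun k hk => ?_, fun k hk => (PySem.Dict.contains_iff_mem_keys _ _).mpr (hmem k hk)⟩
    have hk4 := (Hk k).mp hk
    simp only [List.mem_cons, List.not_mem_nil, or_false] at hk4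
    rcases hk4 with rfl | rfl | rfl | rfl
    · rw [if_pos rfl, hsome _ hk, h1]
    · rw [if_neg (by decide), if_pos rfl, hsome _ hk, h2]
    · rw [if_neg (by decide), if_neg (by decide), if_pos rfl, hsome _ hk, h3]
    · rw [if_neg (by decide), if_neg (by decide), if_neg (by decide), if_pos rfl, hsome _ hk, h4]

-- membership in B's index = A's scan, for a built dict
theorem seen_contains (lod : List (List (String × String))) (x p ic : String) :
    (seenOf lod).contains (x, p, x, ic)
      = lod.any (fun e => pyDictBeq e [("id", x), ("parent", p), ("text", x), ("icon", ic)]) := by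
  simp only [pyDictBeq_built]
  rw [Bool.eq_iff_iff]
  simp only [seenOf, PySem.Set.contains_iff, PySem.Set.mem_ofList, List.mem_filterMap,
    List.any_eq_true, Bool.and_eq_true, beq_iff_eq]
  constructor
  · rintro ⟨e, he, hf⟩
    by_cases hko : keysOKB e = true
    · rw [if_pos hko] at hf
      exact ⟨e, he, hko, by injection hf⟩
    · rw [if_neg hko] at hf; exact absurd hf (by simp)
  · rintro ⟨e, he, hko, ht⟩
    exact ⟨e, he, by rw [if_pos hko, ht]⟩

theorem buildB_eq (lod : List (List (String × String))) :
    ∀ (comps : List String) (prev : String),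
      buildB (seenOf lod) prev comps
        = (mapLast comps prev).filter (fun d => ! (lod.any (fun e => pyDictBeq e d))) := by
  intro comps
  induction comps with
  | nil => intro prev; simp [buildB, mapLast]
  | cons x rest ih =>
    intro prev
    rw [buildB, mapLast]
    cases hr : rest.isEmpty
    · simp only [if_neg (by simp : ¬ (false = true)), List.filter_cons, seen_contains lod, ih x]
      cases hm : lod.any (fun e => pyDictBeq e [("id", x), ("parent", prev), ("text", x),
          ("icon", "/static/file_icons/folder.png")]) <;> simp_all
    · simp only [List.filter_cons, seen_contains lod, ih x]
      cases hm : lod.any (fun e => pyDictBeq e [("id", x), ("parent", prev), ("text", x),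
          ("icon", "/static/file_icons/text.png")]) <;> simp_all

-- ===== VERDICT (by name: the statement is the Claim_ definition above) =====
theorem derive_jstree_tree_structure_from_path_spec : Claim_equal_derive_jstree_tree_structure_from_path := by
  intro le lod par _
  unfold Spec_derive_jstree_tree_structure_from_path
  unfold derive_jstree_tree_structure_from_path derive_jstree_tree_structure_from_path_alt
  rw [loopA_eq lod _ _ par 1 [] (by omega), buildB_eq lod]
  simp
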